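-- pv_equiv track=rewrite | github.com/miliar/Code_Jam_Webscraper | solutions_python/Problem_200/5081.py | check
-- ===== SOURCE A (Python) =====
-- def check(n):
--     l = list(n[::-1])
--     for i in range(0, len(l) - 1):
--         if l[i] >= l[i + 1]:
--             continue
--         else:
--             return False
--     return True
-- ===== SOURCE B (Python) =====
-- def check(n):
--     return list(n) == sorted(n)
-- ===== Notes on version B (the rewrite author's own statement) =====
-- stated objective: simpler
-- what changed: Replaces the reversed-copy plus indexed adjacent-pair scan with a single sort-and-compare: the input equals its sorted version iff it is non-decreasing, which is exactly when the reversed sequence is non-increasing.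
import Mathlib
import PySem

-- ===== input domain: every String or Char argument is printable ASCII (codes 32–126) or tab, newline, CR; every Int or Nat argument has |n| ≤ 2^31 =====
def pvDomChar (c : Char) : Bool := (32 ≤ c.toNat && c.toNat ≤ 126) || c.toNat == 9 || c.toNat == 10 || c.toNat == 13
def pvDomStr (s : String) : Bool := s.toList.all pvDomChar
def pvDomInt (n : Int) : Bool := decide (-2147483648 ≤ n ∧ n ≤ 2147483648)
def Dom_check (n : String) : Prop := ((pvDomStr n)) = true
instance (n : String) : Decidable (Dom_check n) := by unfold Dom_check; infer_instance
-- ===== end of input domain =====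

-- B replaces A's reversed-copy + indexed adjacent scan by sort-and-compare (simpler; returns the same Bool).

-- ===== PORT A =====
-- the loop 'for i in range(0, len(l)-1): if l[i] >= l[i+1]: continue else: return False'
-- (indices produced by range are always in bounds, so pyGetD with a dummy default is exact)
def checkGo (l : List Char) : List Int → Bool
  | [] => true
  | i :: rest =>
      if PySem.List.pyGetD l (i + 1) ' ' ≤ PySem.List.pyGetD l i ' ' then checkGo l rest
      else false

def check (n : String) : Bool :=
  -- l = list(n[::-1]); slice with step -1 never raises (slice?_none_none_neg_one: it is the reverse)
  let l : List Char := (PySem.List.slice? n.toList none none (-1)).getD []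
  checkGo l (PySem.List.pyRange 0 ((l.length : Int) - 1) 1)

-- ===== PORT B =====
def check_alt (n : String) : Bool :=
  n.toList == PySem.List.sorted n.toList (fun x => x) false

-- ===== PRECONDITION & SPEC =====
def Spec_check (n : String) (out : Bool) : Prop := out = check_alt n
instance (n : String) (out : Bool) : Decidable (Spec_check n out) := by unfold Spec_check; infer_instance

-- ===== CLAIM (what is proved, stated in full; the proofs are below) =====
def Claim_equal_check : Prop := ∀ (n : String), Dom_check n → Spec_check n (check n)

-- ===== LEMMAS AND PROOFS =====

-- A's loop starting at index j decides Chain' (· ≥ ·) on the suffix of l from j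
theorem checkGo_spec (l : List Char) (j : Nat) :
    checkGo l (PySem.List.pyRange (j : Int) ((l.length : Int) - 1) 1) =
      decide (List.IsChain (fun a b => b ≤ a) (l.drop j)) := by
  by_cases h : j + 1 < l.length
  · have hlt : (j : Int) < (l.length : Int) - 1 := by omega
    rw [PySem.List.pyRange_one_cons hlt]
    have hj : j < l.length := by omega
    have hd : l.drop j = l[j] :: l[j+1] :: l.drop (j + 2) := by
      rw [List.drop_eq_getElem_cons hj, List.drop_eq_getElem_cons h]
    have hg1 : PySem.List.pyGetD l ((j : Int) + 1) ' ' = l[j+1] := by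
      have : ((j : Int) + 1) = ((j + 1 : Nat) : Int) := by push_cast; ring
      rw [this, PySem.List.pyGetD_natCast]
      simp [h]
    have hg0 : PySem.List.pyGetD l (j : Int) ' ' = l[j] := by
      rw [PySem.List.pyGetD_natCast]
      simp [hj]
    have hrec : ((j : Int) + 1) = ((j + 1 : Nat) : Int) := by push_cast; ring
    rw [checkGo, hg0, hg1, hrec, checkGo_spec l (j + 1)]
    rw [List.drop_eq_getElem_cons h] -- drop (j+1) = l[j+1] :: drop (j+2)
    rw [hd]
    by_cases hle : l[j+1] ≤ l[j]
    · rw [if_pos hle, decide_eq_decide, show j + 1 + 1 = j + 2 from rfl,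
          List.isChain_cons_cons]
      simp [hle]
    · rw [if_neg hle, eq_comm, decide_eq_false_iff_not, List.isChain_cons_cons]
      exact fun hc => hle hc.1
  · have hnil : PySem.List.pyRange (j : Int) ((l.length : Int) - 1) 1 = [] :=
      PySem.List.pyRange_one_eq_nil (by omega)
    rw [hnil]
    have : List.IsChain (fun a b : Char => b ≤ a) (l.drop j) := by
      have hlen : (l.drop j).length ≤ 1 := by simp; omega
      match hd : l.drop j, hlen with
      | [], _ => exact List.IsChain.nil
      | [a], _ => exact List.IsChain.singleton a
    simp [checkGo, this]
termination_by l.length - j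

theorem check_eq_true_iff (n : String) :
    check n = true ↔ List.IsChain (fun a b : Char => a ≤ b) n.toList := by
  unfold check
  rw [PySem.List.slice?_none_none_neg_one]
  simp only [Option.getD_some]
  have h0 : ((0 : Int)) = ((0 : Nat) : Int) := by norm_num
  rw [show (PySem.List.pyRange 0 ((n.toList.reverse.length : Int) - 1) 1)
        = PySem.List.pyRange ((0 : Nat) : Int) ((n.toList.reverse.length : Int) - 1) 1 by norm_num,
      checkGo_spec]
  simp only [List.drop_zero, decide_eq_true_eq]
  exact List.isChain_reverse

theorem check_alt_eq_true_iff (n : String) :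
    check_alt n = true ↔ List.IsChain (fun a b : Char => a ≤ b) n.toList := by
  unfold check_alt
  rw [beq_iff_eq]
  constructor
  · intro h
    have hp : (PySem.List.sorted n.toList (fun x => x) false).Pairwise (fun a b => a ≤ b) :=
      PySem.List.sorted_pairwise n.toList (fun x => x)
    rw [← h] at hp
    exact List.Pairwise.isChain hp
  · intro h
    have hp : List.Pairwise (fun a b : Char => a ≤ b) n.toList := List.isChain_iff_pairwise.mp h
    exact (PySem.List.sorted_eq_self_of_pairwise n.toList (fun x => x) hp).symm

-- ===== VERDICT (by name: the statement is the Claim_ definition above) =====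
theorem check_spec : Claim_equal_check := by
  intro n _
  unfold Spec_check
  have h1 := check_eq_true_iff n
  have h2 := check_alt_eq_true_iff n
  by_cases h : List.IsChain (fun a b : Char => a ≤ b) n.toList
  · rw [h1.mpr h, (h2.mpr h)]
  · rw [Bool.eq_false_iff.mpr (fun hc => h (h1.mp hc)),
        Bool.eq_false_iff.mpr (fun hc => h (h2.mp hc))]
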